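-- pv_equiv track=rewrite | github.com/Ad1thya-R/CSE202 | TD1/chains.py | cost_bin_pow
-- ===== SOURCE A (Python) =====
-- def cost_bin_pow(n):
--     if n==0 or n==1:
--         return 0
--     else:
--         if n%2==0:
--             return 1 + cost_bin_pow(n//2)
--         else:
--             return 2 + cost_bin_pow(n//2)
-- ===== SOURCE B (Python) =====
-- def cost_bin_pow(n):
--     cost = 0
--     while n != 0 and n != 1:
--         cost += 1 if n % 2 == 0 else 2
--         n //= 2
--     return cost
-- ===== Notes on version B (the rewrite author's own statement) =====
-- stated objective: simpler
-- what changed: Replaced the recursive descent with an iterative while-loop that halves n and keeps the running cost in an accumulator.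
import Mathlib
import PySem

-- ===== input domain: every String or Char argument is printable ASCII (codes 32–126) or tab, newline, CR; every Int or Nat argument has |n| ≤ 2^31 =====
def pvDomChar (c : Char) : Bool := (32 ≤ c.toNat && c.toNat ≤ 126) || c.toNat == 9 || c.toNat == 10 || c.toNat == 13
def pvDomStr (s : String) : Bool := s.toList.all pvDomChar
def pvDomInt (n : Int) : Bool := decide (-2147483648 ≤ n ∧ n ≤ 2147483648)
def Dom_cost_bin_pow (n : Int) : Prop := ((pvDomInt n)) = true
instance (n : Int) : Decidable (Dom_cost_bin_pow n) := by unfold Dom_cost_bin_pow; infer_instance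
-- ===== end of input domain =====

-- B replaces A's recursive descent with an iterative halving loop carrying the cost in an accumulator (objective: simpler).


-- ===== PORT A =====
-- A's recursion, made total with fuel; n.toNat + 1 steps suffice for every n ≥ 0 (Pre_ excludes n < 0, where A never terminates).
def costAGo : Nat → Int → Int
  | 0, _ => 0
  | fuel + 1, n =>
    if n == 0 || n == 1 then 0
    else if PySem.Int.mod n 2 == 0 then 1 + costAGo fuel (PySem.Int.floordiv n 2)
    else 2 + costAGo fuel (PySem.Int.floordiv n 2)

def cost_bin_pow (n : Int) : Int := costAGo (n.toNat + 1) n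

-- ===== PORT B =====
-- B's while-loop, made total with the same fuel bound; the accumulator is `acc`.
def costBGo : Nat → Int → Int → Int
  | 0, _, acc => acc
  | fuel + 1, n, acc =>
    if n != 0 && n != 1 then
      costBGo fuel (PySem.Int.floordiv n 2) (acc + if PySem.Int.mod n 2 == 0 then 1 else 2)
    else acc

def cost_bin_pow_alt (n : Int) : Int := costBGo (n.toNat + 1) n 0

-- ===== PRECONDITION & SPEC =====
-- Pre_ excludes n < 0: there Python A recurses forever (RecursionError) and Python B loops forever.
def Pre_cost_bin_pow (n : Int) : Prop := 0 ≤ n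
instance (n : Int) : Decidable (Pre_cost_bin_pow n) := by unfold Pre_cost_bin_pow; infer_instance
def pvWitness_cost_bin_pow : Int := 6

def Spec_cost_bin_pow (n : Int) (out : Int) : Prop := out = cost_bin_pow_alt n
instance (n : Int) (out : Int) : Decidable (Spec_cost_bin_pow n out) := by unfold Spec_cost_bin_pow; infer_instance

-- ===== CLAIM (what is proved, stated in full; the proofs are below) =====
def Claim_equal_cost_bin_pow : Prop := ∀ (n : Int), Dom_cost_bin_pow n → Pre_cost_bin_pow n → Spec_cost_bin_pow n (cost_bin_pow n)

-- ===== LEMMAS AND PROOFS =====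

-- Loop/recursion bridge: with enough fuel, B's loop computes acc + A's recursion.
theorem costBGo_eq_acc_add_costAGo (m : Nat) :
    ∀ (n : Int), 0 ≤ n → n.toNat = m → ∀ (k : Nat) (acc : Int), m < k →
      costBGo k n acc = acc + costAGo k n := by
  induction m using Nat.strong_induction_on with
  | _ m ih =>
    intro n hn hm k acc hk
    obtain ⟨k, rfl⟩ : ∃ k', k = k' + 1 := ⟨k - 1, by omega⟩
    by_cases hbase : n = 0 ∨ n = 1
    · have h01 : (n == 0 || n == 1) = true := by
        rcases hbase with h | h <;> simp [h]
      have h01' : (n != 0 && n != 1) = false := by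
        rcases hbase with h | h <;> simp [h]
      simp [costBGo, costAGo, h01, h01']
    · rw [not_or] at hbase
      have h01 : (n == 0 || n == 1) = false := by
        simp [hbase.1, hbase.2]
      have h01' : (n != 0 && n != 1) = true := by
        simp [hbase.1, hbase.2]
      have hn2 : 2 ≤ n := by omega
      have hfd : PySem.Int.floordiv n 2 = n / 2 :=
        PySem.Int.floordiv_eq_ediv_of_pos (by omega)
      have hlt : (n / 2).toNat < m := by omega
      have hrec := ih (n / 2).toNat hlt (n / 2) (by omega) rfl k
        (acc + if PySem.Int.mod n 2 == 0 then 1 else 2) (by omega)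
      simp only [costBGo, costAGo, h01, h01', if_true, if_false, Bool.false_eq_true,
        hfd] at *
      rw [hrec]
      split_ifs <;> ring
-- ===== VERDICT (by name: the statement is the Claim_ definition above) =====
theorem cost_bin_pow_spec : Claim_equal_cost_bin_pow := by
  intro n _ hpre
  unfold Spec_cost_bin_pow cost_bin_pow cost_bin_pow_alt
  rw [costBGo_eq_acc_add_costAGo n.toNat n hpre rfl (n.toNat + 1) 0 (by omega)]
  ring
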